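-- pv_equiv track=rewrite | github.com/mcsltd/ecganncmp2 | ecganncmp.py | _check_required_groups
-- ===== SOURCE A (Python) =====
-- _REQURED_GROUPS = [
--     set(["2.1", "2.2", "2.3", "2.4", "2.5", "2.6", "2.7"]),
--     ["3.1"]
-- ]
--
-- def _check_required_groups(test_data):
--     results = {}
--     for db in test_data:
--         results[db] = {}
--         for rec in test_data[db]:
--             rec_items = test_data[db][rec]
--             group_flags = [False for _ in _REQURED_GROUPS]
--             for item in rec_items:
--                 item_group = _get_group_id(item)
--                 for i, groups in enumerate(_REQURED_GROUPS):
--                     if group_flags[i]: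
--                         continue
--                     group_flags[i] = item_group in groups
--             results[db][rec] = all(group_flags)
--     return results
--
-- def _get_group_id(conclision_id):
--     last_point = conclision_id.rfind(".")
--     if last_point < 0:
--         return None
--     return conclision_id[:last_point]
-- ===== SOURCE B (Python) =====
-- _REQURED_GROUPS = [
--     set(["2.1", "2.2", "2.3", "2.4", "2.5", "2.6", "2.7"]),
--     ["3.1"]
-- ]
--
-- def _get_group_id(conclision_id):
--     last_point = conclision_id.rfind(".")
--     if last_point < 0:
--         return None
--     return conclision_id[:last_point]
--
-- def _record_ok(rec_items):
--     present = {_get_group_id(item) for item in rec_items}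
--     return all(bool(present & set(groups)) for groups in _REQURED_GROUPS)
--
-- def _check_required_groups(test_data):
--     return {db: {rec: _record_ok(rec_items)
--                  for rec, rec_items in recs.items()}
--             for db, recs in test_data.items()}
-- ===== Notes on version B (the rewrite author's own statement) =====
-- stated objective: simpler
-- what changed: B replaces A's mutable per-group boolean-flag list updated by a nested scan over every item with one set of present group ids per record tested by set intersection against each required group, and builds the result by dict comprehensions over .items() instead of A's key-loop with per-key re-lookup.
import Mathlib
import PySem

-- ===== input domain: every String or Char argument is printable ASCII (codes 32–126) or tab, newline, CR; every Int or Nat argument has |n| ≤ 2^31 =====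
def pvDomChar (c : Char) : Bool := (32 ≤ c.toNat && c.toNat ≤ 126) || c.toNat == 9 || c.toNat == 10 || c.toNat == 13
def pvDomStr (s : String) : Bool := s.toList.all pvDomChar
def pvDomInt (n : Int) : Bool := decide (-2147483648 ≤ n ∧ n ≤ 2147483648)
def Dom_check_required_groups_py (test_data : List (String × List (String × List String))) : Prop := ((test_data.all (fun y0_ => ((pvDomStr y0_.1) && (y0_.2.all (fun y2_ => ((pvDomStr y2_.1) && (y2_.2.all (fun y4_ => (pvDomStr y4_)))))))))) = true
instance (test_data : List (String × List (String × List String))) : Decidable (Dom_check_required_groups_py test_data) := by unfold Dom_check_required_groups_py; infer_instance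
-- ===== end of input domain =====

-- B replaces A's per-group boolean-flag list and nested flag-update scan by one set of present
-- group ids per record tested by set intersection, and builds the result by comprehensions
-- over .items() instead of A's key loop with re-lookup (simpler).

-- ===== PORT A =====
-- shared helper: _get_group_id (used verbatim by both Pythons)
def getGroupId (s : String) : Option String :=
  let lastPoint := PySem.Str.rfind s "."
  if lastPoint < 0 then none
  else some (PySem.Str.slice s none (some lastPoint))

-- _REQURED_GROUPS as A sees it: a set of strings and a plain list
def grpA1 : List String := PySem.Set.ofList ["2.1", "2.2", "2.3", "2.4", "2.5", "2.6", "2.7"]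
def grpA2 : List String := ["3.1"]
def requiredGroupsA : List (List String) := [grpA1, grpA2]

-- Python 'item_group in groups' where item_group is Optional[str]: None is never in a set/list of str
def pyOptMem (g? : Option String) (gs : List String) : Bool :=
  match g? with
  | none => false
  | some g => gs.contains g

-- per-record body of A: the flag list, the item loop with the enumerate loop, then all(group_flags)
def recOkA (rec_items : List String) : Bool :=
  let group_flags := requiredGroupsA.map (fun _ => false)
  let flags := rec_items.foldl (fun flags item =>
    let item_group := getGroupId item
    (PySem.List.enumerate requiredGroupsA).foldl (fun fl ig =>
      if PySem.List.pyGetD fl ig.1 false then fl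
      else PySem.List.pySetD fl ig.1 (pyOptMem item_group ig.2)) flags) group_flags
  flags.all id

-- A iterates the two dicts by key ('for db in test_data', 'for rec in test_data[db]'),
-- re-looking each value up, and grows the result dicts entry by entry
def check_required_groups_py (test_data : List (String × List (String × List String))) : List (String × List (String × Bool)) :=
  let td := PySem.Dict.ofList test_data
  td.keys.foldl (fun results db =>
    results ++ [(db,
      (PySem.Dict.ofList (td.getD db [])).keys.foldl (fun recRes rec =>
        let rec_items := (PySem.Dict.ofList (td.getD db [])).getD rec []
        recRes ++ [(rec, recOkA rec_items)]) [])]) []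

-- ===== PORT B =====
-- _REQURED_GROUPS as B uses them: compared against Optional[str] group ids, hence lifted to Option String
def grpB1 : PySem.Set (Option String) :=
  PySem.Set.ofList [some "2.1", some "2.2", some "2.3", some "2.4", some "2.5", some "2.6", some "2.7"]
def grpB2 : List (Option String) := [some "3.1"]
def requiredGroupsB : List (List (Option String)) := [grpB1, grpB2]

-- _record_ok: present = {_get_group_id(item) …}; all(bool(present & set(groups)) …)
def recOkB (rec_items : List String) : Bool :=
  let present := PySem.Set.ofList (rec_items.map getGroupId)
  requiredGroupsB.all (fun groups =>
    !(PySem.Set.inter present (PySem.Set.ofList groups)).isEmpty)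

-- B: nested dict comprehensions over .items()
def check_required_groups_py_alt (test_data : List (String × List (String × List String))) : List (String × List (String × Bool)) :=
  (PySem.Dict.ofList test_data).items.map (fun dbRecs =>
    (dbRecs.1, (PySem.Dict.ofList dbRecs.2).items.map (fun recItems =>
      (recItems.1, recOkB recItems.2))))

-- ===== PRECONDITION & SPEC =====
def Spec_check_required_groups_py (test_data : List (String × List (String × List String))) (out : List (String × List (String × Bool))) : Prop := out = check_required_groups_py_alt test_data
instance (test_data : List (String × List (String × List String))) (out : List (String × List (String × Bool))) : Decidable (Spec_check_required_groups_py test_data out) := by unfold Spec_check_required_groups_py; infer_instance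

-- ===== CLAIM =====
def Claim_equal_check_required_groups_py : Prop := ∀ (test_data : List (String × List (String × List String))), Dom_check_required_groups_py test_data → Spec_check_required_groups_py test_data (check_required_groups_py test_data)

-- ===== LEMMAS AND PROOFS =====

-- one item step of A's inner enumerate loop, on a two-flag list
theorem stepA_eq (a b : Bool) (o : Option String) :
    (PySem.List.enumerate requiredGroupsA).foldl (fun fl ig =>
      if PySem.List.pyGetD fl ig.1 false then fl
      else PySem.List.pySetD fl ig.1 (pyOptMem o ig.2)) [a, b]
    = [a || pyOptMem o grpA1, b || pyOptMem o grpA2] := by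
  cases a <;> cases b <;>
    simp [requiredGroupsA, PySem.List.enumerate, PySem.List.pyGetD, PySem.List.pyIdx?,
      PySem.List.pyGet?, PySem.List.pySetD, PySem.List.pySet?]

-- A's item loop accumulates, flag by flag, "some item's group lies in this group set"
theorem foldA_eq (items : List String) (a b : Bool) :
    items.foldl (fun flags item =>
      let item_group := getGroupId item
      (PySem.List.enumerate requiredGroupsA).foldl (fun fl ig =>
        if PySem.List.pyGetD fl ig.1 false then fl
        else PySem.List.pySetD fl ig.1 (pyOptMem item_group ig.2)) flags) [a, b]
    = [a || items.any (fun it => pyOptMem (getGroupId it) grpA1),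
       b || items.any (fun it => pyOptMem (getGroupId it) grpA2)] := by
  induction items generalizing a b with
  | nil => simp
  | cons x xs ih =>
      rw [List.foldl_cons]
      show List.foldl _ ((PySem.List.enumerate requiredGroupsA).foldl _ [a, b]) xs = _
      rw [stepA_eq, ih]
      simp [Bool.or_assoc]

theorem recOkA_eq (items : List String) :
    recOkA items = (items.any (fun it => pyOptMem (getGroupId it) grpA1)
      && items.any (fun it => pyOptMem (getGroupId it) grpA2)) := by
  simp only [recOkA]
  rw [show requiredGroupsA.map (fun _ => false) = [false, false] from rfl]
  rw [foldA_eq]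
  simp

-- non-emptiness of the present-set ∩ group-set intersection is an 'any' over the items
theorem inter_nonempty_eq (g : List (Option String)) (items : List String) :
    (!(PySem.Set.inter (PySem.Set.ofList (items.map getGroupId)) (PySem.Set.ofList g)).isEmpty)
    = items.any (fun it => g.contains (getGroupId it)) := by
  by_cases h : ∃ it ∈ items, getGroupId it ∈ g
  · obtain ⟨it, hit, hg⟩ := h
    have hmem : getGroupId it ∈ PySem.Set.inter (PySem.Set.ofList (items.map getGroupId)) (PySem.Set.ofList g) := by
      simp only [PySem.Set.inter, List.mem_filter, PySem.Set.mem_ofList, PySem.Set.contains]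
      constructor
      · exact List.mem_map_of_mem hit
      · simp only [List.contains_iff_mem, PySem.Set.mem_ofList] at *
        simpa using hg
    have hne : (PySem.Set.inter (PySem.Set.ofList (items.map getGroupId)) (PySem.Set.ofList g)) ≠ [] :=
      fun hnil => by rw [hnil] at hmem; exact absurd hmem (List.not_mem_nil)
    rw [List.isEmpty_eq_false_iff.mpr hne]
    symm
    rw [Bool.not_false, List.any_eq_true]
    exact ⟨it, hit, by simpa using hg⟩
  · have hnil : PySem.Set.inter (PySem.Set.ofList (items.map getGroupId)) (PySem.Set.ofList g) = [] := by
      simp only [PySem.Set.inter, List.filter_eq_nil_iff]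
      intro x hx
      rw [PySem.Set.mem_ofList, List.mem_map] at hx
      obtain ⟨it, hit, rfl⟩ := hx
      simp only [PySem.Set.contains, List.contains_iff_mem, PySem.Set.mem_ofList]
      exact fun hg => h ⟨it, hit, by simpa using hg⟩
    rw [hnil]
    symm
    rw [show ((List.isEmpty ([] : List (Option String))) = true) from rfl]
    rw [Bool.not_true, List.any_eq_false]
    intro it hit
    simp only [List.contains_iff_mem]
    exact fun hg => h ⟨it, hit, by simpa using hg⟩

-- the two concrete group constants test the same membership
theorem mem1_eq (o : Option String) : List.contains grpB1 o = pyOptMem o grpA1 := by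
  cases o <;> simp [grpB1, grpA1, pyOptMem, PySem.Set.ofList, PySem.Set.add]
theorem mem2_eq (o : Option String) : List.contains grpB2 o = pyOptMem o grpA2 := by
  cases o <;> simp [grpB2, grpA2, pyOptMem]

-- the per-record computations agree
theorem recOk_eq : recOkA = recOkB := by
  funext items
  rw [recOkA_eq]
  unfold recOkB requiredGroupsB
  simp only [List.all_cons, List.all_nil, Bool.and_true, inter_nonempty_eq]
  simp only [mem1_eq, mem2_eq]

-- the inner record dict: A's key loop with re-lookup = B's comprehension over items
theorem inner_eq (recs : List (String × List String)) :
    (PySem.Dict.ofList recs).keys.foldl (fun recRes rec =>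
      recRes ++ [(rec, recOkA ((PySem.Dict.ofList recs).getD rec []))]) []
    = (PySem.Dict.ofList recs).items.map (fun recItems => (recItems.1, recOkB recItems.2)) := by
  rw [PySem.List.foldl_append_singleton_eq_map
    (fun rec => (rec, recOkA ((PySem.Dict.ofList recs).getD rec []))), List.nil_append]
  rw [PySem.Dict.items_eq_map_keys (PySem.Dict.ofList recs) (PySem.Dict.nodup_keys_ofList recs) []]
  rw [List.map_map]
  simp [recOk_eq]

-- ===== VERDICT (by name: the statement is the Claim_ definition above) =====
theorem check_required_groups_py_spec : Claim_equal_check_required_groups_py := by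
  intro test_data _
  show check_required_groups_py test_data = check_required_groups_py_alt test_data
  unfold check_required_groups_py check_required_groups_py_alt
  rw [PySem.List.foldl_append_singleton_eq_map
    (fun db => (db, (PySem.Dict.ofList ((PySem.Dict.ofList test_data).getD db [])).keys.foldl
      (fun recRes rec => recRes ++ [(rec, recOkA ((PySem.Dict.ofList ((PySem.Dict.ofList test_data).getD db [])).getD rec []))]) [])),
    List.nil_append]
  rw [PySem.Dict.items_eq_map_keys (PySem.Dict.ofList test_data) (PySem.Dict.nodup_keys_ofList test_data) []]
  rw [List.map_map]
  exact List.map_congr_left (fun db _ => by rw [inner_eq]; rfl)
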